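-- pv_equiv track=rewrite | github.com/liuwei464976266/mygit | play/QM9000JAVA.py | getColsSymbol
-- ===== SOURCE A (Python) =====
-- def getColsSymbol(points):  # 取出各列中奖位置
--     symbol12_list = []
--     symbol11_list = []
--     col1, col2, col3, col4, col5 = {}, {}, {}, {}, {}
--     for i in range(len(points)):
--         if points[i] == 9:
--             symbol12_list.append(i)
--         elif points[i] == 11:
--             symbol11_list.append(i)
--         elif i % 5 == 0:
--             col1[i] = points[i]
--         elif i % 5 == 1:
--             col2[i] = points[i]
--         elif i % 5 == 2:
--             col3[i] = points[i]
--         elif i % 5 == 3: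
--             col4[i] = points[i]
--         elif i % 5 == 4:
--             col5[i] = points[i]
--     return col1, col2, col3, col4, col5, symbol12_list, symbol11_list
-- ===== SOURCE B (Python) =====
-- def getColsSymbol(points):  # same result by independent filtering passes instead of one priority cascade
--     symbol12_list = [i for i, v in enumerate(points) if v == 9]
--     symbol11_list = [i for i, v in enumerate(points) if v == 11]
--
--     def col(k):
--         return {i: v for i, v in enumerate(points) if v != 9 and v != 11 and i % 5 == k}
--
--     return col(0), col(1), col(2), col(3), col(4), symbol12_list, symbol11_list
-- ===== Notes on version B (the rewrite author's own statement) =====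
-- stated objective: alternative
-- what changed: A's single loop with a seven-branch priority cascade mutating seven accumulators is replaced by seven independent filtering passes over enumerate(points): two list comprehensions for the 9/11 index lists and one dict comprehension per column keyed by i % 5.
import Mathlib
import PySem

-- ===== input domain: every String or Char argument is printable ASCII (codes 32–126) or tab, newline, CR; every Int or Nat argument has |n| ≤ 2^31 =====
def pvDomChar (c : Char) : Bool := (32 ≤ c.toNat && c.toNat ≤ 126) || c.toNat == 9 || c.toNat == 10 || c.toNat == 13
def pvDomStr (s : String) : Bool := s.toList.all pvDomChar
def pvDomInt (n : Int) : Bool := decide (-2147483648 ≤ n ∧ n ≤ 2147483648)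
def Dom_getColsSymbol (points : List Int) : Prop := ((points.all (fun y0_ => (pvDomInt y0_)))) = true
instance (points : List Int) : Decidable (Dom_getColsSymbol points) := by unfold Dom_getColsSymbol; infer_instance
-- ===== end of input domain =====

-- B replaces A's single seven-branch priority-cascade loop by seven independent
-- filtering passes over enumerate(points) (alternative decomposition, same cost).


-- ===== PORT A =====
-- loop state: (col1, col2, col3, col4, col5, symbol12_list, symbol11_list)
def pvStepA (points : List Int)
    (st : PySem.Dict Int Int × PySem.Dict Int Int × PySem.Dict Int Int × PySem.Dict Int Int × PySem.Dict Int Int × List Int × List Int)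
    (i : Int) :
    PySem.Dict Int Int × PySem.Dict Int Int × PySem.Dict Int Int × PySem.Dict Int Int × PySem.Dict Int Int × List Int × List Int :=
  let (c1, c2, c3, c4, c5, s12, s11) := st
  -- points[i] for i produced by range(len(points)) is always in range, so getD is exact
  let v := PySem.List.pyGetD points i 0
  if v = 9 then (c1, c2, c3, c4, c5, s12 ++ [i], s11)
  else if v = 11 then (c1, c2, c3, c4, c5, s12, s11 ++ [i])
  else if PySem.Int.mod i 5 = 0 then (c1.insert i v, c2, c3, c4, c5, s12, s11)
  else if PySem.Int.mod i 5 = 1 then (c1, c2.insert i v, c3, c4, c5, s12, s11)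
  else if PySem.Int.mod i 5 = 2 then (c1, c2, c3.insert i v, c4, c5, s12, s11)
  else if PySem.Int.mod i 5 = 3 then (c1, c2, c3, c4.insert i v, c5, s12, s11)
  else if PySem.Int.mod i 5 = 4 then (c1, c2, c3, c4, c5.insert i v, s12, s11)
  else (c1, c2, c3, c4, c5, s12, s11)

def getColsSymbol (points : List Int) : (List (Int × Int)) × (List (Int × Int)) × (List (Int × Int)) × (List (Int × Int)) × (List (Int × Int)) × List Int × List Int :=
  let r := (PySem.List.pyRange 0 points.length 1).foldl (pvStepA points)
    (PySem.Dict.empty, PySem.Dict.empty, PySem.Dict.empty, PySem.Dict.empty, PySem.Dict.empty, [], [])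
  (r.1.items, r.2.1.items, r.2.2.1.items, r.2.2.2.1.items, r.2.2.2.2.1.items, r.2.2.2.2.2.1, r.2.2.2.2.2.2)

-- ===== PORT B =====
-- [i for i, v in enumerate(points) if v == t]
def pvSym (points : List Int) (t : Int) : List Int :=
  (PySem.List.enumerate points).filterMap (fun p => if p.2 = t then some p.1 else none)

-- {i: v for i, v in enumerate(points) if v != 9 and v != 11 and i % 5 == k};
-- the keys i from enumerate are pairwise distinct, so this dict comprehension is
-- exactly the filtered association list, in order
def pvColAlt (points : List Int) (k : Int) : List (Int × Int) :=
  (PySem.List.enumerate points).filterMap (fun p =>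
    if p.2 ≠ 9 ∧ p.2 ≠ 11 ∧ PySem.Int.mod p.1 5 = k then some p else none)

def getColsSymbol_alt (points : List Int) : (List (Int × Int)) × (List (Int × Int)) × (List (Int × Int)) × (List (Int × Int)) × (List (Int × Int)) × List Int × List Int :=
  (pvColAlt points 0, pvColAlt points 1, pvColAlt points 2, pvColAlt points 3, pvColAlt points 4,
    pvSym points 9, pvSym points 11)

-- ===== PRECONDITION & SPEC =====
def Spec_getColsSymbol (points : List Int) (out : (List (Int × Int)) × (List (Int × Int)) × (List (Int × Int)) × (List (Int × Int)) × (List (Int × Int)) × List Int × List Int) : Prop := out = getColsSymbol_alt points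
instance (points : List Int) (out : (List (Int × Int)) × (List (Int × Int)) × (List (Int × Int)) × (List (Int × Int)) × (List (Int × Int)) × List Int × List Int) : Decidable (Spec_getColsSymbol points out) := by
  unfold Spec_getColsSymbol
  have h1 : DecidableEq (List (Int × Int)) := inferInstance
  have h2 : DecidableEq (List Int) := inferInstance
  infer_instance

-- ===== CLAIM (what is proved, stated in full; the proofs are below) =====
def Claim_equal_getColsSymbol : Prop := ∀ (points : List Int), Dom_getColsSymbol points → Spec_getColsSymbol points (getColsSymbol points)

-- ===== LEMMAS AND PROOFS =====

-- keys appearing in a column of B computed on xs are < xs.length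
lemma pvColAlt_key_lt (xs : List Int) (k : Int) :
    ∀ p ∈ pvColAlt xs k, p.1 < (xs.length : Int) := by
  intro p hp
  simp only [pvColAlt, List.mem_filterMap] at hp
  obtain ⟨q, hq, hq2⟩ := hp
  rw [PySem.List.mem_enumerate_iff] at hq
  obtain ⟨j, hj, rfl⟩ := hq
  have hpj : p = (0 + (j : Int), xs[j]) := by
    split at hq2
    · exact (Option.some.inj hq2).symm
    · cases hq2
  rw [hpj]
  show (0 : Int) + (j : Int) < (xs.length : Int)
  omega

-- inserting a fresh key appends
lemma mk_insert_fresh (l : List (Int × Int)) (k v : Int)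
    (h : ∀ p ∈ l, p.1 < k) :
    (PySem.Dict.mk l).insert k v = PySem.Dict.mk (l ++ [(k, v)]) := by
  have hc : (PySem.Dict.mk l).contains k = false := by
    rw [PySem.Dict.contains_mk]
    simp only [List.any_eq_false, beq_iff_eq]
    intro p hp
    have := h p hp
    omega
  apply PySem.Dict.ext
  rw [PySem.Dict.items_insert_of_not_contains _ v hc]

lemma pvColAlt_append (xs : List Int) (x : Int) (k : Int) :
    pvColAlt (xs ++ [x]) k =
      pvColAlt xs k ++
        (if x ≠ 9 ∧ x ≠ 11 ∧ PySem.Int.mod (xs.length : Int) 5 = k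
          then [((xs.length : Int), x)] else []) := by
  simp only [pvColAlt, PySem.List.enumerate_append, List.filterMap_append,
    PySem.List.enumerate_cons, PySem.List.enumerate_nil]
  split <;> simp_all

lemma pvSym_append (xs : List Int) (x : Int) (t : Int) :
    pvSym (xs ++ [x]) t =
      pvSym xs t ++ (if x = t then [(xs.length : Int)] else []) := by
  simp only [pvSym, PySem.List.enumerate_append, List.filterMap_append,
    PySem.List.enumerate_cons, PySem.List.enumerate_nil]
  split <;> simp_all

-- the fold of A over range(len(xs)) equals B's seven passes over xs
lemma foldA_eq (xs : List Int) :
    (PySem.List.pyRange 0 xs.length 1).foldl (pvStepA xs)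
      (PySem.Dict.empty, PySem.Dict.empty, PySem.Dict.empty, PySem.Dict.empty, PySem.Dict.empty, [], []) =
    (PySem.Dict.mk (pvColAlt xs 0), PySem.Dict.mk (pvColAlt xs 1), PySem.Dict.mk (pvColAlt xs 2),
      PySem.Dict.mk (pvColAlt xs 3), PySem.Dict.mk (pvColAlt xs 4), pvSym xs 9, pvSym xs 11) := by
  induction xs using List.reverseRecOn with
  | nil => rfl
  | append_singleton xs x ih =>
    have hlen : ((xs ++ [x]).length : Int) = (xs.length : Int) + 1 := by simp
    rw [hlen, PySem.List.pyRange_one_succ_right (by positivity), List.foldl_append]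
    have hcongr : (PySem.List.pyRange 0 xs.length 1).foldl (pvStepA (xs ++ [x]))
        (PySem.Dict.empty, PySem.Dict.empty, PySem.Dict.empty, PySem.Dict.empty, PySem.Dict.empty, [], []) =
        (PySem.List.pyRange 0 xs.length 1).foldl (pvStepA xs)
        (PySem.Dict.empty, PySem.Dict.empty, PySem.Dict.empty, PySem.Dict.empty, PySem.Dict.empty, [], []) := by
      apply PySem.List.foldl_congr_mem
      intro acc i hi
      rw [PySem.List.mem_pyRange_one] at hi
      obtain ⟨h0, hlt⟩ := hi
      obtain ⟨m, rfl⟩ : ∃ m : Nat, i = (m : Int) := ⟨i.toNat, by omega⟩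
      have hv : PySem.List.pyGetD (xs ++ [x]) (m : Int) 0 = PySem.List.pyGetD xs (m : Int) 0 := by
        rw [PySem.List.pyGetD_natCast, PySem.List.pyGetD_natCast,
          List.getD_append _ _ _ _ (by omega)]
      simp only [pvStepA, hv]
    rw [hcongr, ih]
    -- one step of A at index xs.length, on state = B's value for xs
    have hget : PySem.List.pyGetD (xs ++ [x]) (xs.length : Int) 0 = x := by
      rw [PySem.List.pyGetD_natCast, List.getD_append_right xs [x] 0 xs.length (le_refl _)]
      simp [List.getD]
    simp only [List.foldl_cons, List.foldl_nil, pvStepA, hget]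
    simp only [pvColAlt_append, pvSym_append]
    have hins : ∀ k : Int, (PySem.Dict.mk (pvColAlt xs k)).insert (xs.length : Int) x
        = PySem.Dict.mk (pvColAlt xs k ++ [((xs.length : Int), x)]) :=
      fun k => mk_insert_fresh _ _ _ (pvColAlt_key_lt xs k)
    by_cases h9 : x = 9
    · simp [h9]
    by_cases h11 : x = 11
    · simp [h11]
    have hcast : (xs.length : Int) % 5 = ((xs.length % 5 : Nat) : Int) := by omega
    rcases (by omega : xs.length % 5 = 0 ∨ xs.length % 5 = 1 ∨ xs.length % 5 = 2 ∨
        xs.length % 5 = 3 ∨ xs.length % 5 = 4) with hr | hr | hr | hr | hr <;>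
      simp [Int.dvd_iff_emod_eq_zero, hcast, hr, h9, h11, hins]

-- ===== VERDICT (by name: the statement is the Claim_ definition above) =====
theorem getColsSymbol_spec : Claim_equal_getColsSymbol := by
  intro points _
  unfold Spec_getColsSymbol getColsSymbol getColsSymbol_alt
  rw [foldA_eq]
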